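-- pv_equiv track=rewrite | github.com/Bonnieliuliu/LeetCodePlayGround | Simple/MinLengthSubStringWithSameDegree.py | MinSubStringWithSameDegree
-- ===== SOURCE A (Python) =====
-- def MinSubStringWithSameDegree(given_list):
--     position_map = {} # <element, [start_index, end_index]>
--     freq_map = {} # <element, frequency>
--     degree = 0
--     for i in range(len(given_list)):
--         freq_map[given_list[i]] = freq_map.get(given_list[i], 0) + 1
--         if freq_map[given_list[i]] == 1:
--             position_map[given_list[i]] = [i, i]
--         else:
--             position_map[given_list[i]][1] = i
--         degree = max(degree, freq_map[given_list[i]])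
--     min_length = len(given_list)
--     for (k, v) in freq_map.items():
--         if degree == v:
--             if min_length > position_map[k][1] - position_map[k][0] + 1:
--                 min_length = position_map[k][1] - position_map[k][0] + 1
--     return min_length
-- ===== SOURCE B (Python) =====
-- def MinSubStringWithSameDegree(given_list):
--     # single pass: first-occurrence map + running counts, tracking the best window on the fly
--     first = {}
--     count = {}
--     degree = 0
--     ans = 0
--     for i, x in enumerate(given_list):
--         if x not in first:
--             first[x] = i
--         count[x] = count.get(x, 0) + 1
--         c = count[x]
--         if c > degree:
--             degree = c
--             ans = i - first[x] + 1
--         elif c == degree: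
--             ans = min(ans, i - first[x] + 1)
--     return ans
-- ===== Notes on version B (the rewrite author's own statement) =====
-- stated objective: simpler
-- what changed: B drops A's end-position map and second loop over freq_map.items(): a single pass keeps only each element's first index and running count and updates the best window length on the fly (reset on a strictly larger degree, min on a tie).
import Mathlib
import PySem

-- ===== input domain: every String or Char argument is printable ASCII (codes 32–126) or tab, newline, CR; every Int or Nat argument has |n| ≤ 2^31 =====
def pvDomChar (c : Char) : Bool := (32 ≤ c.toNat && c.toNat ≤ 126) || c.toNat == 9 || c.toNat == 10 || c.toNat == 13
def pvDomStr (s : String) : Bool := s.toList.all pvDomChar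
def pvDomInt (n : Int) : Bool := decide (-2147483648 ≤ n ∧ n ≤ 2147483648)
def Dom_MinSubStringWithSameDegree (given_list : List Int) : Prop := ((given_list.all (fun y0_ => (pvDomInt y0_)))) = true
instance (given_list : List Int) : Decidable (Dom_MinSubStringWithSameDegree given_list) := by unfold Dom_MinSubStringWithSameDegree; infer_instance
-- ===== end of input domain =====

-- B replaces A's end-position map and second pass over the distinct elements by a single
-- pass that updates the best window length on the fly (objective: simpler, one loop).

-- ===== PORT A =====
-- loop body of A: updates (position_map, freq_map, degree) for the pair (i, given_list[i])
def pvStepA (st : PySem.Dict Int (Int × Int) × PySem.Dict Int Int × Int) (p : Int × Int) :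
    PySem.Dict Int (Int × Int) × PySem.Dict Int Int × Int :=
  let freq := st.2.1.insert p.2 (st.2.1.getD p.2 0 + 1)
  -- Python stores the 2-element list [start, end]; ported as the pair (start, end),
  -- 'position_map[x][1] = i' becomes modifying the second component (key always present)
  let pos := if freq.getD p.2 0 == 1 then st.1.insert p.2 (p.1, p.1)
             else st.1.modify p.2 (0, 0) (fun q => (q.1, p.1))
  (pos, freq, max st.2.2 (freq.getD p.2 0))

-- second loop of A: min_length folded over freq_map.items()
def pvFinStepA (pos : PySem.Dict Int (Int × Int)) (degree : Int) (m : Int) (kv : Int × Int) : Int :=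
  if degree == kv.2 then
    if m > (pos.getD kv.1 (0, 0)).2 - (pos.getD kv.1 (0, 0)).1 + 1 then
      (pos.getD kv.1 (0, 0)).2 - (pos.getD kv.1 (0, 0)).1 + 1
    else m
  else m

def MinSubStringWithSameDegree (given_list : List Int) : Int :=
  -- 'for i in range(len(given_list))' reading given_list[i] ported via enumerate pairing
  let st := (PySem.List.enumerate given_list).foldl pvStepA (PySem.Dict.empty, PySem.Dict.empty, 0)
  st.2.1.items.foldl (pvFinStepA st.1 st.2.2) (given_list.length : Int)

-- ===== PORT B =====
-- loop body of B: updates (first, count, degree, ans) for the pair (i, x)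
def pvStepB (st : PySem.Dict Int Int × PySem.Dict Int Int × Int × Int) (p : Int × Int) :
    PySem.Dict Int Int × PySem.Dict Int Int × Int × Int :=
  let first := if st.1.contains p.2 then st.1 else st.1.insert p.2 p.1
  let count := st.2.1.insert p.2 (st.2.1.getD p.2 0 + 1)
  let c := count.getD p.2 0
  if c > st.2.2.1 then (first, count, c, p.1 - first.getD p.2 0 + 1)
  else if c == st.2.2.1 then (first, count, st.2.2.1, min st.2.2.2 (p.1 - first.getD p.2 0 + 1))
  else (first, count, st.2.2.1, st.2.2.2)

def MinSubStringWithSameDegree_alt (given_list : List Int) : Int :=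
  ((PySem.List.enumerate given_list).foldl pvStepB
    (PySem.Dict.empty, PySem.Dict.empty, 0, 0)).2.2.2

-- ===== PRECONDITION & SPEC =====
def Spec_MinSubStringWithSameDegree (given_list : List Int) (out : Int) : Prop := out = MinSubStringWithSameDegree_alt given_list
instance (given_list : List Int) (out : Int) : Decidable (Spec_MinSubStringWithSameDegree given_list out) := by unfold Spec_MinSubStringWithSameDegree; infer_instance

-- ===== CLAIM (what is proved, stated in full; the proofs are below) =====
def Claim_equal_MinSubStringWithSameDegree : Prop := ∀ (given_list : List Int), Dom_MinSubStringWithSameDegree given_list → Spec_MinSubStringWithSameDegree given_list (MinSubStringWithSameDegree given_list)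

-- ===== LEMMAS AND PROOFS =====

-- The coupling invariant between A's state (pos, freq, degree) and B's state
-- (first, count, degree, ans) after processing the first j elements.
def pvInv (j : Int) (sA : PySem.Dict Int (Int × Int) × PySem.Dict Int Int × Int)
    (sB : PySem.Dict Int Int × PySem.Dict Int Int × Int × Int) : Prop :=
  0 ≤ j ∧
  sA.2.1 = sB.2.1 ∧
  sA.2.2 = sB.2.2.1 ∧
  (∀ k, sB.1.get? k = (sA.1.get? k).map Prod.fst) ∧
  (∀ k, (sA.2.1.get? k).isSome = (sA.1.get? k).isSome) ∧
  (∀ k v, sA.1.get? k = some v → 0 ≤ v.1 ∧ v.1 ≤ v.2 ∧ v.2 < j) ∧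
  (∀ k c, sA.2.1.get? k = some c → 1 ≤ c ∧ c ≤ sA.2.2) ∧
  sA.2.1.keys.Nodup ∧
  (sA.2.2 = 0 → j = 0 ∧ sB.2.2.2 = 0) ∧
  (sA.2.2 ≠ 0 →
    (∀ k v, sA.2.1.get? k = some sA.2.2 → sA.1.get? k = some v → sB.2.2.2 ≤ v.2 - v.1 + 1) ∧
    (∃ k v, sA.2.1.get? k = some sA.2.2 ∧ sA.1.get? k = some v ∧ sB.2.2.2 = v.2 - v.1 + 1))

theorem pvInv_init : pvInv 0 (PySem.Dict.empty, PySem.Dict.empty, 0) (PySem.Dict.empty, PySem.Dict.empty, 0, 0) := by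
  refine ⟨le_refl 0, rfl, rfl, ?_, ?_, ?_, ?_, ?_, ?_, ?_⟩ <;>
    simp [PySem.Dict.get?_empty]

-- conjuncts of pvInv shared by every branch of the step (pos gains the entry (a, j))
theorem pvStep_core (j x a c degA : Int) (pos : PySem.Dict Int (Int × Int))
    (freq : PySem.Dict Int Int) (first' : PySem.Dict Int Int)
    (ha0 : 0 ≤ a) (haj : a ≤ j) (hc1 : 1 ≤ c)
    (hfx : ∀ k, first'.get? k = if k = x then some a else (pos.get? k).map Prod.fst)
    (hkeys : ∀ k, (freq.get? k).isSome = (pos.get? k).isSome)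
    (hpos : ∀ k v, pos.get? k = some v → 0 ≤ v.1 ∧ v.1 ≤ v.2 ∧ v.2 < j)
    (hfreq : ∀ k c', freq.get? k = some c' → 1 ≤ c' ∧ c' ≤ degA)
    (hnd : freq.keys.Nodup) :
    (∀ k, first'.get? k = ((pos.insert x (a, j)).get? k).map Prod.fst) ∧
    (∀ k, ((freq.insert x c).get? k).isSome = ((pos.insert x (a, j)).get? k).isSome) ∧
    (∀ k v, (pos.insert x (a, j)).get? k = some v → 0 ≤ v.1 ∧ v.1 ≤ v.2 ∧ v.2 < j + 1) ∧
    (∀ k c', (freq.insert x c).get? k = some c' → 1 ≤ c' ∧ c' ≤ max degA c) ∧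
    (freq.insert x c).keys.Nodup := by
  refine ⟨?_, ?_, ?_, ?_, PySem.Dict.nodup_keys_insert _ _ _ hnd⟩
  · intro k
    rw [hfx k, PySem.Dict.get?_insert]
    split_ifs with hk
    · simp
    · rfl
  · intro k
    rw [PySem.Dict.get?_insert, PySem.Dict.get?_insert]
    split_ifs with hk
    · simp
    · exact hkeys k
  · intro k v
    rw [PySem.Dict.get?_insert]
    split_ifs with hk
    · rintro ⟨⟩; exact ⟨ha0, haj, by omega⟩
    · intro hv; have := hpos k v hv; omega
  · intro k c'
    rw [PySem.Dict.get?_insert]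
    split_ifs with hk
    · rintro ⟨⟩
      exact ⟨hc1, le_max_right _ _⟩
    · intro hv; have := hfreq k c' hv
      exact ⟨this.1, le_trans this.2 (le_max_left _ _)⟩

theorem pvInv_step (j x : Int) (sA : PySem.Dict Int (Int × Int) × PySem.Dict Int Int × Int)
    (sB : PySem.Dict Int Int × PySem.Dict Int Int × Int × Int) (h : pvInv j sA sB) :
    pvInv (j + 1) (pvStepA sA (j, x)) (pvStepB sB (j, x)) := by
  obtain ⟨pos, freq, degA⟩ := sA
  obtain ⟨first, count, degB, ans⟩ := sB
  obtain ⟨hj, hfc, hdeg, hfirst, hkeys, hpos, hfreq, hnd, hz, hms⟩ := h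
  simp only at hfc hdeg hfirst hkeys hpos hfreq hnd hz hms
  subst hfc hdeg
  have F0 : 0 ≤ degA := by
    by_cases h0 : degA = 0
    · omega
    · obtain ⟨-, k0, v0, hk0, -⟩ := hms h0
      have := hfreq k0 degA hk0
      omega
  simp only [pvStepB, pvStepA, PySem.Dict.getD_insert_self]
  rcases hx : freq.get? x with _ | m
  · -- x not seen before: freq.getD x 0 = 0
    have hm0 : freq.getD x 0 = 0 := PySem.Dict.getD_of_get?_eq_none _ _ hx
    have hposx : pos.get? x = none := by
      have h1 := hkeys x
      rw [hx] at h1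
      exact Option.not_isSome_iff_eq_none.mp (by rw [← h1]; simp)
    have hfirstx : first.get? x = none := by rw [hfirst x, hposx]; rfl
    have hcont : first.contains x = false := by
      rw [PySem.Dict.contains_eq_isSome_get?, hfirstx]; rfl
    simp only [hm0, hcont, Bool.false_eq_true, if_false, zero_add,
      PySem.Dict.getD_insert_self, Int.reduceBEq, reduceIte]
    have hfx : ∀ k, (first.insert x j).get? k =
        if k = x then some j else (pos.get? k).map Prod.fst := by
      intro k
      rw [PySem.Dict.get?_insert]
      split_ifs with hk
      · rfl
      · exact hfirst k
    obtain ⟨c1, c2, c3, c4, c5⟩ :=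
      pvStep_core j x j 1 degA pos freq (first.insert x j) hj (le_refl j)
        (by omega) hfx hkeys hpos hfreq hnd
    by_cases hd0 : degA = 0
    · subst hd0
      rw [if_pos (by omega : (1:Int) > 0)]
      unfold pvInv
      dsimp only
      refine ⟨by omega, rfl, by omega, c1, c2, c3, c4, c5, by omega, ?_⟩
      intro hne
      constructor
      · intro k v hkf hkp
        rw [PySem.Dict.get?_insert] at hkf hkp
        split_ifs at hkf hkp with hk
        · cases hkp; omega
        · have := hfreq k _ hkf
          omega
      · refine ⟨x, (j, j), ?_, ?_, by omega⟩
        · rw [PySem.Dict.get?_insert, if_pos rfl]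
          norm_num
        · rw [PySem.Dict.get?_insert, if_pos rfl]
    · obtain ⟨hlb, k0, v0, hk0f, hk0p, hansv⟩ := hms hd0
      have hk0x : k0 ≠ x := fun he => by rw [he, hx] at hk0f; cases hk0f
      rw [if_neg (by omega : ¬ (1:Int) > degA)]
      by_cases hd1 : degA = 1
      · subst hd1
        rw [if_pos (by norm_num : ((1:Int) == 1) = true)]
        unfold pvInv
        dsimp only
        refine ⟨by omega, rfl, by omega, c1, c2, c3, c4, c5, by omega, ?_⟩
        intro hne
        constructor
        · intro k v hkf hkp
          rw [PySem.Dict.get?_insert] at hkf hkp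
          split_ifs at hkf hkp with hk
          · cases hkp
            have hmin : min ans (j - j + 1) ≤ j - j + 1 := min_le_right _ _
            simp only [max_self] at *
            omega
          · have h2 := hlb k v hkf hkp
            have hmin : min ans (j - j + 1) ≤ ans := min_le_left _ _
            simp only [max_self] at *
            omega
        · by_cases hle : ans ≤ 1
          · refine ⟨k0, v0, ?_, ?_, ?_⟩
            · rw [PySem.Dict.get?_insert, if_neg hk0x]
              exact hk0f
            · rw [PySem.Dict.get?_insert, if_neg hk0x]
              exact hk0p
            · omega
          · refine ⟨x, (j, j), ?_, ?_, ?_⟩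
            · rw [PySem.Dict.get?_insert, if_pos rfl]
              norm_num
            · rw [PySem.Dict.get?_insert, if_pos rfl]
            · omega
      · -- degA ≥ 2
        rw [if_neg (by simp only [beq_iff_eq]; omega : ¬ ((1:Int) == degA) = true)]
        unfold pvInv
        dsimp only
        refine ⟨by omega, rfl, by omega, c1, c2, c3, c4, c5, by omega, ?_⟩
        intro hne
        have hmax : max degA 1 = degA := by omega
        rw [hmax]
        obtain ⟨hlb', _⟩ := hms hd0
        constructor
        · intro k v hkf hkp
          rw [PySem.Dict.get?_insert] at hkf hkp
          split_ifs at hkf hkp with hk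
          · cases hkf; omega
          · exact hlb' k v hkf hkp
        · refine ⟨k0, v0, ?_, ?_, hansv⟩
          · rw [PySem.Dict.get?_insert, if_neg hk0x]
            exact hk0f
          · rw [PySem.Dict.get?_insert, if_neg hk0x]
            exact hk0p
  · -- x seen before with count m
    have hm : freq.getD x 0 = m := PySem.Dict.getD_of_get?_eq_some _ _ hx
    obtain ⟨hm1, hmd⟩ := hfreq x m hx
    have hpsx : (pos.get? x).isSome := by rw [← hkeys x, hx]; rfl
    obtain ⟨v, hv⟩ := Option.isSome_iff_exists.mp hpsx
    obtain ⟨hv0, hv12, hv2j⟩ := hpos x v hv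
    have hgv : pos.getD x (0, 0) = v := PySem.Dict.getD_of_get?_eq_some _ _ hv
    have hfirstx : first.get? x = some v.1 := by rw [hfirst x, hv]; rfl
    have hcont : first.contains x = true := by
      rw [PySem.Dict.contains_eq_isSome_get?, hfirstx]; rfl
    have hfgd : first.getD x 0 = v.1 := PySem.Dict.getD_of_get?_eq_some _ _ hfirstx
    have hmod : pos.modify x (0, 0) (fun q => (q.1, j)) = pos.insert x (v.1, j) := by
      show pos.insert x _ = _
      rw [hgv]
    simp only [hm, hcont, if_true, hfgd,
      if_neg (by simp only [beq_iff_eq]; omega : ¬ ((m + 1 : Int) == 1) = true), hmod]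
    have hfx : ∀ k, first.get? k =
        if k = x then some v.1 else (pos.get? k).map Prod.fst := by
      intro k
      split_ifs with hk
      · rw [hk]; exact hfirstx
      · exact hfirst k
    obtain ⟨c1, c2, c3, c4, c5⟩ :=
      pvStep_core j x v.1 (m + 1) degA pos freq first hv0 (by omega)
        (by omega) hfx hkeys hpos hfreq hnd
    by_cases hgt : m + 1 > degA
    · -- count of x becomes the new, strictly larger degree
      rw [if_pos hgt]
      unfold pvInv
      dsimp only
      refine ⟨by omega, rfl, by omega, c1, c2, c3, c4, c5, by omega, ?_⟩
      intro hne
      constructor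
      · intro k w hkf hkp
        rw [PySem.Dict.get?_insert] at hkf hkp
        split_ifs at hkf hkp with hk
        · cases hkp; simp only [max_eq_right (by omega : degA ≤ m + 1)] at *; omega
        · have := hfreq k _ hkf
          simp only [max_eq_right (by omega : degA ≤ m + 1)] at hkf
          omega
      · refine ⟨x, (v.1, j), ?_, ?_, by omega⟩
        · rw [PySem.Dict.get?_insert, if_pos rfl, max_eq_right (by omega : degA ≤ m + 1)]
        · rw [PySem.Dict.get?_insert, if_pos rfl]
    · have hk0 := hms (by omega : degA ≠ 0)
      obtain ⟨hlb, k0, v0, hk0f, hk0p, hansv⟩ := hk0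
      have hmax : max degA (m + 1) = degA := by omega
      rw [hmax] at c4 ⊢
      by_cases heq : m + 1 = degA
      · -- x reaches the current degree: take the min
        rw [if_pos (by simp only [beq_iff_eq]; omega : ((m + 1 : Int) == degA) = true),
          if_neg (by omega : ¬ m + 1 > degA)]
        have hk0x : k0 ≠ x := fun he => by
          rw [he, hx] at hk0f
          cases hk0f
          omega
        unfold pvInv
        dsimp only
        refine ⟨by omega, rfl, by omega, c1, c2, c3, c4, c5, by omega, ?_⟩
        intro hne
        constructor
        · intro k w hkf hkp
          rw [PySem.Dict.get?_insert] at hkf hkp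
          split_ifs at hkf hkp with hk
          · cases hkp
            have := min_le_right ans (j - v.1 + 1)
            omega
          · have h2 := hlb k w hkf hkp
            have := min_le_left ans (j - v.1 + 1)
            omega
        · by_cases hle : ans ≤ j - v.1 + 1
          · refine ⟨k0, v0, ?_, ?_, ?_⟩
            · rw [PySem.Dict.get?_insert, if_neg hk0x]
              exact hk0f
            · rw [PySem.Dict.get?_insert, if_neg hk0x]
              exact hk0p
            · omega
          · refine ⟨x, (v.1, j), ?_, ?_, ?_⟩
            · rw [PySem.Dict.get?_insert, if_pos rfl, heq]
            · rw [PySem.Dict.get?_insert, if_pos rfl]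
            · omega
      · -- count of x stays below the degree: nothing changes
        rw [if_neg (by omega : ¬ m + 1 > degA),
          if_neg (by simp only [beq_iff_eq]; omega : ¬ ((m + 1 : Int) == degA) = true)]
        have hk0x : k0 ≠ x := fun he => by
          rw [he, hx] at hk0f
          cases hk0f
          omega
        unfold pvInv
        dsimp only
        refine ⟨by omega, rfl, by omega, c1, c2, c3, c4, c5, by omega, ?_⟩
        intro hne
        constructor
        · intro k w hkf hkp
          rw [PySem.Dict.get?_insert] at hkf hkp
          split_ifs at hkf hkp with hk
          · cases hkf; omega
          · exact hlb k w hkf hkp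
        · refine ⟨k0, v0, ?_, ?_, hansv⟩
          · rw [PySem.Dict.get?_insert, if_neg hk0x]
            exact hk0f
          · rw [PySem.Dict.get?_insert, if_neg hk0x]
            exact hk0p

theorem pvInv_fold (l : List Int) (j : Int) (sA : PySem.Dict Int (Int × Int) × PySem.Dict Int Int × Int)
    (sB : PySem.Dict Int Int × PySem.Dict Int Int × Int × Int) (h : pvInv j sA sB) :
    pvInv (j + l.length) ((PySem.List.enumerate l j).foldl pvStepA sA)
      ((PySem.List.enumerate l j).foldl pvStepB sB) := by
  induction l generalizing j sA sB with
  | nil => simpa using h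
  | cons x xs ih =>
      have h2 := ih (j + 1) _ _ (pvInv_step j x sA sB h)
      have he : PySem.List.enumerate (x :: xs) j = (j, x) :: PySem.List.enumerate xs (j + 1) := rfl
      rw [he]
      simp only [List.foldl_cons]
      have harith : j + 1 + (xs.length : Int) = j + ((x :: xs).length : Int) := by
        simp only [List.length_cons]; push_cast; ring
      rw [← harith]
      exact h2

theorem pvFin_lower (pos : PySem.Dict Int (Int × Int)) (degree ans : Int) (items : List (Int × Int))
    (m0 : Int) (hm : ans ≤ m0)
    (h : ∀ kv ∈ items, kv.2 = degree → ans ≤ (pos.getD kv.1 (0, 0)).2 - (pos.getD kv.1 (0, 0)).1 + 1) :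
    ans ≤ items.foldl (pvFinStepA pos degree) m0 := by
  induction items generalizing m0 with
  | nil => simpa using hm
  | cons kv rest ih =>
      simp only [List.foldl_cons]
      refine ih _ ?_ (fun p hp hpd => h p (List.mem_cons_of_mem _ hp) hpd)
      simp only [pvFinStepA]
      split_ifs with h1 h2
      · exact h kv List.mem_cons_self (beq_iff_eq.mp h1).symm
      · exact hm
      · exact hm

theorem pvFin_le_init (pos : PySem.Dict Int (Int × Int)) (degree : Int) (items : List (Int × Int))
    (m0 : Int) : items.foldl (pvFinStepA pos degree) m0 ≤ m0 := by
  induction items generalizing m0 with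
  | nil => simp
  | cons kv rest ih =>
      simp only [List.foldl_cons]
      refine le_trans (ih _) ?_
      simp only [pvFinStepA]; split_ifs <;> omega

theorem pvFin_upper (pos : PySem.Dict Int (Int × Int)) (degree ans : Int) (items : List (Int × Int))
    (m0 : Int) (kv : Int × Int) (hmem : kv ∈ items) (hdeg : kv.2 = degree)
    (hspan : (pos.getD kv.1 (0, 0)).2 - (pos.getD kv.1 (0, 0)).1 + 1 = ans) :
    items.foldl (pvFinStepA pos degree) m0 ≤ ans := by
  induction items generalizing m0 with
  | nil => cases hmem
  | cons p rest ih =>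
      simp only [List.foldl_cons]
      rcases List.mem_cons.mp hmem with h | h
      · subst h
        refine le_trans (pvFin_le_init pos degree rest _) ?_
        simp only [pvFinStepA, hdeg, hspan, BEq.rfl, if_true]
        split_ifs <;> omega
      · exact ih _ h

theorem MinSubStringWithSameDegree_eq (l : List Int) :
    MinSubStringWithSameDegree l = MinSubStringWithSameDegree_alt l := by
  have h := pvInv_fold l 0 _ _ pvInv_init
  rw [zero_add] at h
  unfold MinSubStringWithSameDegree MinSubStringWithSameDegree_alt
  set sA := (PySem.List.enumerate l).foldl pvStepA (PySem.Dict.empty, PySem.Dict.empty, 0) with hsA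
  set sB := (PySem.List.enumerate l).foldl pvStepB (PySem.Dict.empty, PySem.Dict.empty, 0, 0) with hsB
  obtain ⟨hj, hfc, hdeg, hfirst, hkeys, hpos, hfreq, hnd, hz, hms⟩ := h
  show sA.2.1.items.foldl (pvFinStepA sA.1 sA.2.2) (l.length : Int) = sB.2.2.2
  by_cases hd : sA.2.2 = 0
  · obtain ⟨hj0, hans⟩ := hz hd
    have hempty : sA.2.1.items = [] := by
      rw [List.eq_nil_iff_forall_not_mem]
      rintro ⟨k, c⟩ hp
      have hg := PySem.Dict.get?_of_mem_items sA.2.1 hp hnd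
      have := hfreq k c hg
      omega
    rw [hempty]
    simpa [hans] using hj0
  · obtain ⟨hlb, k0, v0, hk0f, hk0p, hansv⟩ := hms hd
    have hv0 := hpos k0 v0 hk0p
    have hgd0 : sA.1.getD k0 (0, 0) = v0 := PySem.Dict.getD_of_get?_eq_some _ _ hk0p
    apply le_antisymm
    · refine pvFin_upper _ _ _ _ _ (k0, sA.2.2)
        (PySem.Dict.mem_items_of_get?_eq_some _ hk0f) rfl ?_
      rw [hgd0]; omega
    · refine pvFin_lower _ _ _ _ _ (by omega) ?_
      rintro ⟨k, c⟩ hkv hkvdeg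
      simp only at hkvdeg
      have hget := PySem.Dict.get?_of_mem_items _ hkv hnd
      rw [hkvdeg] at hget
      have hps : (sA.1.get? k).isSome := by rw [← hkeys]; simp [hget]
      obtain ⟨v, hv⟩ := Option.isSome_iff_exists.mp hps
      have hle := hlb k v hget hv
      have hgd : sA.1.getD k (0, 0) = v := PySem.Dict.getD_of_get?_eq_some _ _ hv
      rw [hgd]
      exact hle

-- ===== VERDICT (by name: the statement is the Claim_ definition above) =====
theorem MinSubStringWithSameDegree_spec : Claim_equal_MinSubStringWithSameDegree := by
  intro l _
  exact MinSubStringWithSameDegree_eq l
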